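-- pv_equiv track=rewrite | github.com/jumbo5337/algorythms | sorting_algorythms/quick_sort.py | quick_sort_alg_gen
-- ===== SOURCE A (Python) =====
-- def quick_sort_alg_gen(array, start, end):
--     if end - start <= 0:
--         return
--     mid = start + (end - start) // 2
--     base = mid
--     i = start
--     # smaller_partition
--     while i < base:
--         if array[i] <= array[base]:
--             i += 1
--         else:
--             buffer = array[i]
--             for k in range(i, mid):
--                 array[k] = array[k + 1]
--             array[mid] = buffer
--             base -= 1
--         yield array
--     j = mid + 1
--     # bigger_partition
--     while j <= end:
--         if array[j] > array[base]:
--             j += 1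
--         else:
--             buffer = array[j]
--             for i in range(j, base, -1):
--                 array[i] = array[i - 1]
--             array[base] = buffer
--             base += 1
--             j += 1
--         yield array
--     yield from quick_sort_alg_gen(array, start, base - 1)
--     yield from quick_sort_alg_gen(array, base + 1, end)
-- ===== SOURCE B (Python) =====
-- def quick_sort_alg_gen(array, start, end):
--     # Functional re-decomposition: each partition phase is a fold over the
--     # segment's VALUES maintaining (kept, moved) resp. (smalls, bigs) lists and
--     # rebuilding the array from those pieces at each step, instead of A's
--     # index-based element shifting; the double recursive "yield from" becomes
--     # an explicit stack of (start, end) ranges.  Mutates `array` in place like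
--     # the original (the yielded object is `array` itself).
--     stack = [(start, end)]
--     while stack:
--         s, e = stack.pop()
--         if e - s <= 0:
--             continue
--         mid = s + (e - s) // 2
--         v = array[mid]
--         queue = array[s:mid]
--         right = array[mid + 1:e + 1]
--         kept, moved = [], []
--         for idx, x in enumerate(queue):
--             if x <= v:
--                 # x just joins `kept`: the segment's concatenation is unchanged
--                 kept = kept + [x]
--             else:
--                 moved = moved + [x]
--                 # only the segment [s..e] changes; the rest of the array stays as is
--                 array[s:e + 1] = kept + queue[idx + 1:] + [v] + moved + right
--             yield array
--         smalls, bigs = [], moved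
--         for idx, x in enumerate(right):
--             if x > v:
--                 # x just joins `bigs`: the segment's concatenation is unchanged
--                 bigs = bigs + [x]
--             else:
--                 smalls = smalls + [x]
--                 array[s:e + 1] = kept + smalls + [v] + bigs + right[idx + 1:]
--             yield array
--         base = s + len(kept) + len(smalls)
--         stack.append((base + 1, e))
--         stack.append((s, base - 1))
-- ===== Notes on version B (the rewrite author's own statement) =====
-- stated objective: alternative
-- what changed: A's index-based in-place partition loops (element-by-element shifts driven by i/j/base indices) become folds over the segment's values that maintain (kept, moved)/(smalls, bigs) lists and rebuild the whole array from those pieces at each step, and the double recursive 'yield from' becomes an explicit stack of (start, end) ranges (left range pushed last so the preorder snapshot sequence is preserved).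
-- outside the precondition, e.g. on quick_sort_alg_gen([-2, 5, -1], -2, -1): A returns [[-2, -1, 5]], B returns []; on quick_sort_alg_gen([1, 3, 2], 0, 3): A raises IndexError, B returns [[1, 2, 3], [1, 2, 3], [1, 2, 3]]
import Mathlib
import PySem

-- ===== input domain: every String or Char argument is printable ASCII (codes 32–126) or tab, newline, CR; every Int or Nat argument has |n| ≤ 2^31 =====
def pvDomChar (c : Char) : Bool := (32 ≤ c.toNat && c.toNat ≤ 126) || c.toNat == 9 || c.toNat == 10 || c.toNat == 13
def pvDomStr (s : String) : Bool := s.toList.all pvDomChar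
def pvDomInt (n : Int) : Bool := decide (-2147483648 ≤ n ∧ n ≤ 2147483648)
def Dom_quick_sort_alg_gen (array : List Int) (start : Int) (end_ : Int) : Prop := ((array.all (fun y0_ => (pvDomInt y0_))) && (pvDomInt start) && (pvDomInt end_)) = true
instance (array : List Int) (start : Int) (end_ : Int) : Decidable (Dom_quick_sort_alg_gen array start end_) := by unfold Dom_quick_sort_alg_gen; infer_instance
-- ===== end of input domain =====

-- B replaces A's index-based in-place partition loops by folds over the segment's values that
-- maintain (kept, moved)/(smalls, bigs) lists and rebuild the array from those pieces, and A's
-- double recursive `yield from` by an explicit stack of ranges; both mutate the Python argument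
-- in place the same way, and the theorems here are about the returned sequence of snapshots.

-- ===== PORT A =====
-- Each while-loop/recursion is ported as a structural recursion on an exact fuel count
-- (the loop measure), a totality guard only: the fuel supplied always suffices.
-- A's first (smaller_partition) while-loop: state (array, i, base); returns (array, yielded snapshots, base).
def qsA_smallerF : Nat → List Int → Int → Int → Int → List Int × List (List Int) × Int
  | 0, a, _, base, _ => (a, [], base)
  | n + 1, a, i, base, mid =>
    if i < base then
      if PySem.List.pyGetD a i 0 ≤ PySem.List.pyGetD a base 0 then
        let r := qsA_smallerF n a (i + 1) base mid
        (r.1, a :: r.2.1, r.2.2)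
      else
        -- buffer = array[i]; for k in range(i, mid): array[k] = array[k+1]; array[mid] = buffer
        let a2 := PySem.List.pySetD
          ((PySem.List.pyRange i mid 1).foldl
            (fun acc k => PySem.List.pySetD acc k (PySem.List.pyGetD acc (k + 1) 0)) a)
          mid (PySem.List.pyGetD a i 0)
        let r := qsA_smallerF n a2 i (base - 1) mid
        (r.1, a2 :: r.2.1, r.2.2)
    else (a, [], base)

-- A's second (bigger_partition) while-loop: state (array, j, base).
def qsA_biggerF : Nat → List Int → Int → Int → Int → List Int × List (List Int) × Int
  | 0, a, _, base, _ => (a, [], base)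
  | n + 1, a, j, base, end_ =>
    if j ≤ end_ then
      if PySem.List.pyGetD a j 0 > PySem.List.pyGetD a base 0 then
        let r := qsA_biggerF n a (j + 1) base end_
        (r.1, a :: r.2.1, r.2.2)
      else
        -- buffer = array[j]; for i in range(j, base, -1): array[i] = array[i-1]; array[base] = buffer
        let a2 := PySem.List.pySetD
          ((PySem.List.pyRange j base (-1)).foldl
            (fun acc k => PySem.List.pySetD acc k (PySem.List.pyGetD acc (k - 1) 0)) a)
          base (PySem.List.pyGetD a j 0)
        let r := qsA_biggerF n a2 (j + 1) (base + 1) end_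
        (r.1, a2 :: r.2.1, r.2.2)
    else (a, [], base)

-- the generator body: returns (final array, list of yielded snapshots); fuel bounds the recursion depth
def qsA_coreF : Nat → List Int → Int → Int → List Int × List (List Int)
  | 0, a, _, _ => (a, [])
  | n + 1, a, s, e =>
    if e - s ≤ 0 then (a, [])
    else
      let mid := s + PySem.Int.floordiv (e - s) 2
      let r1 := qsA_smallerF (mid - s).toNat a s mid mid
      let r2 := qsA_biggerF (e - mid).toNat r1.1 (mid + 1) r1.2.2 e
      let r3 := qsA_coreF n r2.1 s (r2.2.2 - 1)
      let r4 := qsA_coreF n r3.1 (r2.2.2 + 1) e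
      (r4.1, r1.2.1 ++ (r2.2.1 ++ (r3.2 ++ r4.2)))

-- the generator yields the SAME (mutated-in-place) list object each time, so the materialized
-- sequence is the final array repeated once per yield; the port reflects that aliasing.
def quick_sort_alg_gen (array : List Int) (start : Int) (end_ : Int) : List (List Int) :=
  List.replicate (qsA_coreF (end_ - start).toNat array start end_).2.length
    (qsA_coreF (end_ - start).toNat array start end_).1

-- ===== PORT B =====
-- B's first phase: a fold over the queue of values left of the pivot, keeping (kept, moved);
-- returns (kept, moved, snapshots).
def qsB_phase1 (pre : List Int) (v : Int) (right post : List Int) :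
    List Int → List Int → List Int → List Int × List Int × List (List Int)
  | [], kept, moved => (kept, moved, [])
  | x :: q, kept, moved =>
    let km := if x ≤ v then (kept ++ [x], moved) else (kept, moved ++ [x])
    let r := qsB_phase1 pre v right post q km.1 km.2
    (r.1, r.2.1, (pre ++ km.1 ++ q ++ [v] ++ km.2 ++ right ++ post) :: r.2.2)

-- B's second phase: a fold over the values right of the pivot, keeping (smalls, bigs).
def qsB_phase2 (pre2 : List Int) (v : Int) (post : List Int) :
    List Int → List Int → List Int → List Int × List Int × List (List Int)
  | [], smalls, bigs => (smalls, bigs, [])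
  | x :: rem, smalls, bigs =>
    let sb := if x > v then (smalls, bigs ++ [x]) else (smalls ++ [x], bigs)
    let r := qsB_phase2 pre2 v post rem sb.1 sb.2
    (r.1, r.2.1, (pre2 ++ sb.1 ++ [v] ++ sb.2 ++ rem ++ post) :: r.2.2)

-- the stack loop: pop a range, run the two phases, push (base+1,end) then (start,base-1);
-- fuel bounds the iterations.  Source B's segment assignment `array[s:e+1] = pieces` is rendered
-- as `array[:s] ++ pieces ++ array[e+1:]` (the pre/post slices), which is its resulting value.
def qsB_runF : Nat → List Int → List (Int × Int) → List Int × List (List Int)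
  | 0, a, _ => (a, [])
  | _ + 1, a, [] => (a, [])
  | n + 1, a, (s, e) :: rest =>
    if e - s ≤ 0 then qsB_runF n a rest
    else
      let mid := s + PySem.Int.floordiv (e - s) 2
      let v := PySem.List.pyGetD a mid 0
      let pre := PySem.List.slice a none (some s)
      let queue := PySem.List.slice a (some s) (some mid)
      let right := PySem.List.slice a (some (mid + 1)) (some (e + 1))
      let post := PySem.List.slice a (some (e + 1)) none
      let p1 := qsB_phase1 pre v right post queue [] []
      let p2 := qsB_phase2 (pre ++ p1.1) v post right [] p1.2.1
      let a2 := (pre ++ p1.1) ++ p2.1 ++ [v] ++ p2.2.1 ++ post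
      let base := s + (p1.1.length : Int) + (p2.1.length : Int)
      ((qsB_runF n a2 ((s, base - 1) :: (base + 1, e) :: rest)).1,
       p1.2.2 ++ p2.2.2 ++ (qsB_runF n a2 ((s, base - 1) :: (base + 1, e) :: rest)).2)

-- B's generator aliases `array` the same way: the final array repeated once per yield.
def quick_sort_alg_gen_alt (array : List Int) (start : Int) (end_ : Int) : List (List Int) :=
  List.replicate (qsB_runF (2 ^ (end_ - start + 1).toNat) array [(start, end_)]).2.length
    (qsB_runF (2 ^ (end_ - start + 1).toNat) array [(start, end_)]).1

-- ===== PRECONDITION & SPEC =====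
-- Pre_ restricts a non-trivial range to the natural in-bounds call shape 0 ≤ start ≤ end < len(array):
-- with end ≥ len(array) A raises IndexError, and with start < 0 A's snapshots are an accident of
-- Python's negative-index wraparound, outside the function's natural domain.
def Pre_quick_sort_alg_gen (array : List Int) (start : Int) (end_ : Int) : Prop :=
  end_ - start ≤ 0 ∨ (0 ≤ start ∧ end_ < (array.length : Int))
instance (array : List Int) (start : Int) (end_ : Int) : Decidable (Pre_quick_sort_alg_gen array start end_) := by unfold Pre_quick_sort_alg_gen; infer_instance

def pvWitness_quick_sort_alg_gen : List Int × Int × Int := ([3, 1, 2], 0, 2)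

def Spec_quick_sort_alg_gen (array : List Int) (start : Int) (end_ : Int) (out : List (List Int)) : Prop := out = quick_sort_alg_gen_alt array start end_
instance (array : List Int) (start : Int) (end_ : Int) (out : List (List Int)) : Decidable (Spec_quick_sort_alg_gen array start end_ out) := by unfold Spec_quick_sort_alg_gen; infer_instance

-- ===== CLAIM (what is proved, stated in full; the proofs are below) =====
def Claim_equal_quick_sort_alg_gen : Prop := ∀ (array : List Int) (start : Int) (end_ : Int), Dom_quick_sort_alg_gen array start end_ → Pre_quick_sort_alg_gen array start end_ → Spec_quick_sort_alg_gen array start end_ (quick_sort_alg_gen array start end_)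

-- ===== LEMMAS AND PROOFS =====

-- characterization of A's left-shift for-loop (Nat indices)
theorem foldL_nat : ∀ (n : Nat) (a : List Int) (i mid : Nat), mid - i = n → i ≤ mid → mid < a.length →
    (PySem.List.pyRange (i : Int) (mid : Int) 1).foldl
      (fun acc k => PySem.List.pySetD acc k (PySem.List.pyGetD acc (k + 1) 0)) a
    = a.take i ++ ((a.drop (i + 1)).take (mid - i) ++ a.drop mid) := by
  intro n
  induction n with
  | zero =>
      intro a i mid hn hle hlen
      have hi : i = mid := by omega
      subst hi
      rw [PySem.List.pyRange_one_eq_nil (by omega)]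
      simp
  | succ n ih =>
      intro a i mid hn hle hlen
      have hilt : i < mid := by omega
      rw [PySem.List.pyRange_one_cons (by exact_mod_cast hilt)]
      simp only [List.foldl_cons]
      have hcast : (i : Int) + 1 = ((i + 1 : Nat) : Int) := by push_cast; ring
      rw [hcast, PySem.List.pySetD_natCast, PySem.List.pyGetD_natCast]
      have hi1 : i + 1 < a.length := by omega
      have hgetD : a.getD (i + 1) 0 = a[i + 1] := List.getD_eq_getElem a 0 hi1
      rw [hgetD]
      have ihres := ih (a.set i a[i + 1]) (i + 1) mid (by omega) (by omega) (by simpa using hlen)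
      rw [ihres]
      have h1 : (a.set i a[i + 1]).take (i + 1) = a.take i ++ [a[i + 1]] := by
        rw [List.take_set, List.take_succ_eq_append_getElem (by omega)]
        rw [List.set_append]
        simp [List.length_take, show ¬ i < min i a.length by omega, show i - min i a.length = 0 by omega]
      have h2 : (a.set i a[i + 1]).drop (i + 1 + 1) = a.drop (i + 1 + 1) := by
        rw [List.drop_set, if_pos (by omega)]
      have h3 : (a.set i a[i + 1]).drop mid = a.drop mid := by
        rw [List.drop_set, if_pos (by omega)]
      have h4 : (a.drop (i + 1)).take (mid - i) = a[i + 1] :: (a.drop (i + 1 + 1)).take (mid - (i + 1)) := by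
        rw [List.drop_eq_getElem_cons hi1]
        rw [show mid - i = (mid - (i+1)) + 1 by omega]
        rfl
      rw [h1, h2, h3, h4]
      simp

-- characterization of A's right-shift for-loop (Nat indices)
theorem foldR_nat : ∀ (n : Nat) (a : List Int) (b j : Nat), j - b = n → b ≤ j → j < a.length →
    (PySem.List.pyRange (j : Int) (b : Int) (-1)).foldl
      (fun acc k => PySem.List.pySetD acc k (PySem.List.pyGetD acc (k - 1) 0)) a
    = a.take (b + 1) ++ ((a.drop b).take (j - b) ++ a.drop (j + 1)) := by
  intro n
  induction n with
  | zero =>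
      intro a b j hn hle hlen
      have hj : j = b := by omega
      subst hj
      rw [PySem.List.pyRange_neg_one_eq_nil (by omega)]
      simp
  | succ n ih =>
      intro a b j hn hle hlen
      have hlt : b < j := by omega
      rw [PySem.List.pyRange_neg_one_cons (by exact_mod_cast hlt)]
      simp only [List.foldl_cons]
      have hcast : (j : Int) - 1 = ((j - 1 : Nat) : Int) := by
        have : 1 ≤ j := by omega
        push_cast [this]; ring
      rw [PySem.List.pySetD_natCast, hcast, PySem.List.pyGetD_natCast]
      have hj1 : j - 1 < a.length := by omega
      rw [List.getD_eq_getElem a 0 hj1]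
      have ihres := ih (a.set j a[j - 1]) b (j - 1) (by omega) (by omega) (by simp; omega)
      rw [ihres]
      have h1 : (a.set j a[j - 1]).take (b + 1) = a.take (b + 1) := by
        rw [List.take_set, List.set_eq_of_length_le (by simp [List.length_take]; omega)]
      have h2 : (a.set j a[j - 1]).drop b = (a.drop b).set (j - b) a[j - 1] := by
        rw [List.drop_set, if_neg (by omega)]
      have h3 : (a.set j a[j - 1]).drop (j - 1 + 1) = a[j - 1] :: a.drop (j + 1) := by
        rw [List.drop_set, if_neg (by omega), show j - 1 + 1 = j by omega,
          List.drop_eq_getElem_cons hlen, Nat.sub_self, List.set_cons_zero]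
      have h4 : ((a.drop b).set (j - b) a[j - 1]).take (j - 1 - b) = (a.drop b).take (j - 1 - b) := by
        rw [List.take_set, List.set_eq_of_length_le (by simp [List.length_take]; omega)]
      have h5 : (a.drop b).take (j - b) = (a.drop b).take (j - 1 - b) ++ [a[j - 1]] := by
        rw [show j - b = (j - 1 - b) + 1 by omega,
          List.take_succ_eq_append_getElem (by simp; omega)]
        congr 1
        simp
        congr 1
        omega
      rw [h1, h2, h3, h4, h5]
      simp

-- reading/writing at the seam of an append
theorem pyGetD_at_len (u w : List Int) (x : Int) :
    PySem.List.pyGetD (u ++ x :: w) ((u.length : Nat) : Int) 0 = x := by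
  rw [PySem.List.pyGetD_natCast, List.getD_eq_getElem _ _ (by simp)]
  simp

theorem set_at_len (P w : List Int) (z x : Int) :
    (P ++ z :: w).set P.length x = P ++ x :: w := by
  rw [List.set_append, if_neg (by omega)]
  simp

-- A's rotation in the smaller partition, on the decomposed array
theorem rotL (u q moved rest : List Int) (x v : Int) :
    PySem.List.pySetD
      ((PySem.List.pyRange ((u.length : Nat) : Int) (((u.length + 1 + q.length + moved.length : Nat)) : Int) 1).foldl
        (fun acc k => PySem.List.pySetD acc k (PySem.List.pyGetD acc (k + 1) 0))
        (u ++ x :: (q ++ [v] ++ moved ++ rest)))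
      (((u.length + 1 + q.length + moved.length : Nat)) : Int) x
    = u ++ q ++ [v] ++ moved ++ [x] ++ rest := by
  have hlen : u.length + 1 + q.length + moved.length < (u ++ x :: (q ++ [v] ++ moved ++ rest)).length := by
    simp; omega
  rw [foldL_nat ((u.length + 1 + q.length + moved.length) - u.length)
    (u ++ x :: (q ++ [v] ++ moved ++ rest)) u.length (u.length + 1 + q.length + moved.length)
    rfl (by omega) hlen]
  rw [PySem.List.pySetD_natCast]
  have htake : (u ++ x :: (q ++ [v] ++ moved ++ rest)).take u.length = u := by
    simp
  have hdrop1 : (u ++ x :: (q ++ [v] ++ moved ++ rest)).drop (u.length + 1) = q ++ [v] ++ moved ++ rest := by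
    rw [show u ++ x :: (q ++ [v] ++ moved ++ rest) = (u ++ [x]) ++ (q ++ [v] ++ moved ++ rest) by simp]
    exact List.drop_left' (by simp)
  have hmidtake : (q ++ [v] ++ moved ++ rest).take (u.length + 1 + q.length + moved.length - u.length)
      = q ++ [v] ++ moved := by
    rw [show q ++ [v] ++ moved ++ rest = (q ++ [v] ++ moved) ++ rest by simp]
    rw [List.take_left' (by simp; omega)]
  have hdropM : (u ++ x :: (q ++ [v] ++ moved ++ rest)).drop (u.length + 1 + q.length + moved.length)
      = ((u ++ x :: (q ++ [v] ++ moved ++ rest))).drop (u.length + 1 + q.length + moved.length) := rfl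
  -- express drop mid as z :: rest
  have hdropM1 : (u ++ x :: (q ++ [v] ++ moved ++ rest)).drop (u.length + 1 + q.length + moved.length + 1) = rest := by
    rw [show u ++ x :: (q ++ [v] ++ moved ++ rest) = (u ++ x :: (q ++ [v] ++ moved)) ++ rest by simp]
    exact List.drop_left' (by simp; omega)
  have hcons : (u ++ x :: (q ++ [v] ++ moved ++ rest)).drop (u.length + 1 + q.length + moved.length)
      = (u ++ x :: (q ++ [v] ++ moved ++ rest))[u.length + 1 + q.length + moved.length] :: rest := by
    rw [List.drop_eq_getElem_cons hlen, hdropM1]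
  rw [htake, hdrop1, hmidtake, hcons]
  generalize (u ++ x :: (q ++ [v] ++ moved ++ rest))[u.length + 1 + q.length + moved.length] = z
  rw [show u.length + 1 + q.length + moved.length = (u ++ (q ++ [v] ++ moved)).length by simp; omega]
  rw [show u ++ (q ++ [v] ++ moved ++ z :: rest) = (u ++ (q ++ [v] ++ moved)) ++ z :: rest by simp]
  rw [set_at_len]
  simp

-- A's rotation in the bigger partition, on the decomposed array
theorem rotR (u bigs w : List Int) (x v : Int) :
    PySem.List.pySetD
      ((PySem.List.pyRange (((u.length + 1 + bigs.length : Nat)) : Int) ((u.length : Nat) : Int) (-1)).foldl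
        (fun acc k => PySem.List.pySetD acc k (PySem.List.pyGetD acc (k - 1) 0))
        (u ++ v :: (bigs ++ x :: w)))
      ((u.length : Nat) : Int) x
    = u ++ x :: (v :: (bigs ++ w)) := by
  have hlen : u.length + 1 + bigs.length < (u ++ v :: (bigs ++ x :: w)).length := by
    simp; omega
  rw [foldR_nat ((u.length + 1 + bigs.length) - u.length) (u ++ v :: (bigs ++ x :: w))
    u.length (u.length + 1 + bigs.length) rfl (by omega) hlen]
  rw [PySem.List.pySetD_natCast]
  have htake : (u ++ v :: (bigs ++ x :: w)).take (u.length + 1) = u ++ [v] := by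
    rw [show u ++ v :: (bigs ++ x :: w) = (u ++ [v]) ++ (bigs ++ x :: w) by simp]
    exact List.take_left' (by simp)
  have hdropb : (u ++ v :: (bigs ++ x :: w)).drop u.length = v :: (bigs ++ x :: w) :=
    List.drop_left' rfl
  have htake2 : (v :: (bigs ++ x :: w)).take (u.length + 1 + bigs.length - u.length)
      = v :: bigs := by
    rw [show v :: (bigs ++ x :: w) = (v :: bigs) ++ (x :: w) by simp,
      List.take_left' (by simp; omega)]
  have hdropj : (u ++ v :: (bigs ++ x :: w)).drop (u.length + 1 + bigs.length + 1) = w := by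
    rw [show u ++ v :: (bigs ++ x :: w) = (u ++ v :: (bigs ++ [x])) ++ w by simp]
    exact List.drop_left' (by simp; omega)
  rw [hdropb, htake, htake2, hdropj]
  rw [show (u ++ [v]) ++ (v :: bigs ++ w) = u ++ v :: (v :: bigs ++ w) by simp]
  rw [show u.length = (u : List Int).length from rfl]
  rw [set_at_len]
  simp


-- length bookkeeping for B's phases
theorem qsB_phase1_len (pre : List Int) (v : Int) (right post : List Int) :
    ∀ (q kept moved : List Int),
    (qsB_phase1 pre v right post q kept moved).1.length
      + (qsB_phase1 pre v right post q kept moved).2.1.length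
      = kept.length + moved.length + q.length := by
  intro q
  induction q with
  | nil => intro kept moved; simp [qsB_phase1]
  | cons x q' ih =>
      intro kept moved
      by_cases hc : x ≤ v <;> simp [qsB_phase1, hc, ih] <;> omega

theorem qsB_phase2_len (pre2 : List Int) (v : Int) (post : List Int) :
    ∀ (rem smalls bigs : List Int),
    (qsB_phase2 pre2 v post rem smalls bigs).1.length
      + (qsB_phase2 pre2 v post rem smalls bigs).2.1.length
      = smalls.length + bigs.length + rem.length := by
  intro rem
  induction rem with
  | nil => intro smalls bigs; simp [qsB_phase2]
  | cons x r' ih =>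
      intro smalls bigs
      by_cases hc : x > v <;> simp [qsB_phase2, hc, ih] <;> omega

-- A's smaller partition agrees with B's first fold on the decomposed array
theorem phase1_eq (pre right post : List Int) (v : Int) :
    ∀ (q : List Int) (n : Nat) (kept moved : List Int) (i base mid : Int),
    q.length ≤ n →
    i = (pre.length : Int) + (kept.length : Int) →
    base = i + (q.length : Int) →
    mid = base + (moved.length : Int) →
    qsA_smallerF n (pre ++ kept ++ q ++ [v] ++ moved ++ (right ++ post)) i base mid
    = (pre ++ (qsB_phase1 pre v right post q kept moved).1 ++ [v] ++ (qsB_phase1 pre v right post q kept moved).2.1 ++ (right ++ post),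
       (qsB_phase1 pre v right post q kept moved).2.2,
       (pre.length : Int) + ((qsB_phase1 pre v right post q kept moved).1.length : Int)) := by
  intro q
  induction q with
  | nil =>
      intro n kept moved i base mid hn hi hbase hmid
      have hib : ¬ i < base := by simp at hbase; omega
      cases n with
      | zero => simp [qsA_smallerF, qsB_phase1, hbase, hi]
      | succ m => simp [qsA_smallerF, qsB_phase1, hbase, hi]
  | cons x q' ih =>
      intro n kept moved i base mid hn hi hbase hmid
      obtain ⟨m, rfl⟩ : ∃ m, n = m + 1 := ⟨n - 1, by simp at hn; omega⟩
      have hib : i < base := by rw [hbase]; push_cast [List.length_cons]; omega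
      have ha : pre ++ kept ++ (x :: q') ++ [v] ++ moved ++ (right ++ post)
          = (pre ++ kept) ++ x :: (q' ++ [v] ++ moved ++ (right ++ post)) := by simp
      have hx : PySem.List.pyGetD (pre ++ kept ++ (x :: q') ++ [v] ++ moved ++ (right ++ post)) i 0 = x := by
        rw [ha, show i = (((pre ++ kept).length : Nat) : Int) by simp [hi]]
        exact pyGetD_at_len _ _ _
      have hv' : PySem.List.pyGetD (pre ++ kept ++ (x :: q') ++ [v] ++ moved ++ (right ++ post)) base 0 = v := by
        rw [show pre ++ kept ++ (x :: q') ++ [v] ++ moved ++ (right ++ post)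
            = (pre ++ kept ++ (x :: q')) ++ v :: (moved ++ (right ++ post)) by simp,
          show base = (((pre ++ kept ++ (x :: q')).length : Nat) : Int) by
            rw [hbase, hi]; push_cast [List.length_append, List.length_cons]; ring]
        exact pyGetD_at_len _ _ _
      simp only [qsA_smallerF, if_pos hib, hx, hv']
      by_cases hc : x ≤ v
      · rw [if_pos hc]
        have harr : pre ++ kept ++ (x :: q') ++ [v] ++ moved ++ (right ++ post)
            = pre ++ (kept ++ [x]) ++ q' ++ [v] ++ moved ++ (right ++ post) := by simp
        rw [harr]
        rw [ih m (kept ++ [x]) moved (i + 1) base mid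
          (by simp at hn ⊢; omega)
          (by rw [hi]; push_cast [List.length_append, List.length_cons, List.length_nil]; ring)
          (by rw [hbase]; push_cast [List.length_cons]; ring)
          (by rw [hmid])]
        simp only [qsB_phase1, if_pos hc]
        simp
      · rw [if_neg hc]
        rw [ha, show i = (((pre ++ kept).length : Nat) : Int) by simp [hi],
          show mid = ((((pre ++ kept).length + 1 + q'.length + moved.length : Nat)) : Int) by
            rw [hmid, hbase, hi]; push_cast [List.length_append, List.length_cons]; ring]
        rw [rotL]
        rw [show (pre ++ kept) ++ q' ++ [v] ++ moved ++ [x] ++ (right ++ post)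
            = pre ++ kept ++ q' ++ [v] ++ (moved ++ [x]) ++ (right ++ post) by simp]
        rw [ih m kept (moved ++ [x])
          ((((pre ++ kept).length : Nat)) : Int) (base - 1)
          ((((pre ++ kept).length + 1 + q'.length + moved.length : Nat)) : Int)
          (by simp at hn; omega)
          (by push_cast [List.length_append]; ring)
          (by rw [hbase, hi]; push_cast [List.length_append, List.length_cons]; ring)
          (by rw [hbase, hi]; push_cast [List.length_append, List.length_cons, List.length_nil]; ring)]
        simp only [qsB_phase1, if_neg hc]
        simp


-- A's bigger partition agrees with B's second fold on the decomposed array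
theorem phase2_eq (pre2 post : List Int) (v : Int) :
    ∀ (rem : List Int) (n : Nat) (smalls bigs : List Int) (j base end_ : Int),
    rem.length ≤ n →
    base = (pre2.length : Int) + (smalls.length : Int) →
    j = base + 1 + (bigs.length : Int) →
    end_ = base + (bigs.length : Int) + (rem.length : Int) →
    qsA_biggerF n (pre2 ++ smalls ++ [v] ++ bigs ++ rem ++ post) j base end_
    = (pre2 ++ (qsB_phase2 pre2 v post rem smalls bigs).1 ++ [v] ++ (qsB_phase2 pre2 v post rem smalls bigs).2.1 ++ post,
       (qsB_phase2 pre2 v post rem smalls bigs).2.2,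
       (pre2.length : Int) + ((qsB_phase2 pre2 v post rem smalls bigs).1.length : Int)) := by
  intro rem
  induction rem with
  | nil =>
      intro n smalls bigs j base end_ hn hbase hj hend
      have hje : ¬ j ≤ end_ := by rw [hj, hend]; push_cast [List.length_nil]; omega
      cases n with
      | zero => simp [qsA_biggerF, qsB_phase2, hbase]
      | succ m => simp [qsA_biggerF, hje, qsB_phase2, hbase]
  | cons x r' ih =>
      intro n smalls bigs j base end_ hn hbase hj hend
      obtain ⟨m, rfl⟩ : ∃ m, n = m + 1 := ⟨n - 1, by simp at hn; omega⟩
      have hje : j ≤ end_ := by rw [hj, hend]; push_cast [List.length_cons]; omega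
      have ha : pre2 ++ smalls ++ [v] ++ bigs ++ (x :: r') ++ post
          = (pre2 ++ smalls ++ [v] ++ bigs) ++ x :: (r' ++ post) := by simp
      have hx : PySem.List.pyGetD (pre2 ++ smalls ++ [v] ++ bigs ++ (x :: r') ++ post) j 0 = x := by
        rw [ha, show j = (((pre2 ++ smalls ++ [v] ++ bigs).length : Nat) : Int) by
          rw [hj, hbase]; push_cast [List.length_append, List.length_cons, List.length_nil]; ring]
        exact pyGetD_at_len _ _ _
      have hv' : PySem.List.pyGetD (pre2 ++ smalls ++ [v] ++ bigs ++ (x :: r') ++ post) base 0 = v := by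
        rw [show pre2 ++ smalls ++ [v] ++ bigs ++ (x :: r') ++ post
            = (pre2 ++ smalls) ++ v :: (bigs ++ (x :: r') ++ post) by simp,
          show base = (((pre2 ++ smalls).length : Nat) : Int) by simp [hbase]]
        exact pyGetD_at_len _ _ _
      simp only [qsA_biggerF, if_pos hje, hx, hv']
      by_cases hc : x > v
      · rw [if_pos hc]
        have harr : pre2 ++ smalls ++ [v] ++ bigs ++ (x :: r') ++ post
            = pre2 ++ smalls ++ [v] ++ (bigs ++ [x]) ++ r' ++ post := by simp
        rw [harr]
        rw [ih m smalls (bigs ++ [x]) (j + 1) base end_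
          (by simp at hn; omega)
          hbase
          (by rw [hj]; push_cast [List.length_append, List.length_cons, List.length_nil]; ring)
          (by rw [hend]; push_cast [List.length_append, List.length_cons, List.length_nil]; ring)]
        simp only [qsB_phase2, if_pos hc]
      · rw [if_neg hc]
        rw [show pre2 ++ smalls ++ [v] ++ bigs ++ (x :: r') ++ post
            = (pre2 ++ smalls) ++ v :: (bigs ++ x :: (r' ++ post)) by simp,
          show j = ((((pre2 ++ smalls).length + 1 + bigs.length : Nat)) : Int) by
            rw [hj, hbase]; push_cast [List.length_append, List.length_cons]; ring,
          show base = (((pre2 ++ smalls).length : Nat) : Int) by simp [hbase]]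
        rw [rotR]
        rw [show (pre2 ++ smalls) ++ x :: (v :: (bigs ++ (r' ++ post)))
            = pre2 ++ (smalls ++ [x]) ++ [v] ++ bigs ++ r' ++ post by simp]
        rw [ih m (smalls ++ [x]) bigs
          (((((pre2 ++ smalls).length + 1 + bigs.length : Nat)) : Int) + 1)
          (((((pre2 ++ smalls).length : Nat)) : Int) + 1) end_
          (by simp at hn; omega)
          (by push_cast [List.length_append, List.length_cons, List.length_nil]; ring)
          (by push_cast [List.length_append, List.length_cons, List.length_nil]; ring)
          (by rw [hend, hbase]; push_cast [List.length_append, List.length_cons, List.length_nil]; ring)]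
        simp only [qsB_phase2, if_neg hc]

-- bounds on A's base counter (used for the fuel-irrelevance lemma)
theorem qsA_smallerF_base : ∀ (n : Nat) (a : List Int) (i base mid : Int), i ≤ base →
    i ≤ (qsA_smallerF n a i base mid).2.2 ∧ (qsA_smallerF n a i base mid).2.2 ≤ base := by
  intro n
  induction n with
  | zero => intro a i base mid h; exact ⟨h, le_rfl⟩
  | succ n ih =>
      intro a i base mid h
      simp only [qsA_smallerF]
      split_ifs with h1 h2
      · have := ih a (i + 1) base mid (by omega)
        simp only at this ⊢
        omega
      · have := ih (PySem.List.pySetD ((PySem.List.pyRange i mid 1).foldl (fun acc k => PySem.List.pySetD acc k (PySem.List.pyGetD acc (k + 1) 0)) a) mid (PySem.List.pyGetD a i 0)) i (base - 1) mid (by omega)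
        simp only at this ⊢
        omega
      · exact ⟨h, le_rfl⟩

theorem qsA_biggerF_base : ∀ (n : Nat) (a : List Int) (j base end_ : Int), base ≤ end_ → base < j →
    base ≤ (qsA_biggerF n a j base end_).2.2 ∧ (qsA_biggerF n a j base end_).2.2 ≤ end_ := by
  intro n
  induction n with
  | zero => intro a j base end_ h1 h2; exact ⟨le_rfl, h1⟩
  | succ n ih =>
      intro a j base end_ h1 h2
      simp only [qsA_biggerF]
      split_ifs with hj hc
      · have := ih a (j + 1) base end_ h1 (by omega)
        simp only at this ⊢
        omega
      · have := ih (PySem.List.pySetD ((PySem.List.pyRange j base (-1)).foldl (fun acc k => PySem.List.pySetD acc k (PySem.List.pyGetD acc (k - 1) 0)) a) base (PySem.List.pyGetD a j 0)) (j + 1) (base + 1) end_ (by omega) (by omega)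
        simp only at this ⊢
        omega
      · exact ⟨le_rfl, h1⟩

-- fuel irrelevance of A's recursion: any fuel at least (e - s).toNat computes the same result
theorem coreF_fuel : ∀ (n m1 m2 : Nat) (a : List Int) (s e : Int),
    (e - s).toNat ≤ n → (e - s).toNat ≤ m1 → (e - s).toNat ≤ m2 →
    qsA_coreF m1 a s e = qsA_coreF m2 a s e := by
  intro n
  induction n with
  | zero =>
      intro m1 m2 a s e hn h1 h2
      have he : e - s ≤ 0 := by omega
      cases m1 with
      | zero => cases m2 with
        | zero => rfl
        | succ m2 => simp [qsA_coreF, he]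
      | succ m1 => cases m2 with
        | zero => simp [qsA_coreF, he]
        | succ m2 => simp [qsA_coreF, he]
  | succ n ih =>
      intro m1 m2 a s e hn h1 h2
      by_cases he : e - s ≤ 0
      · cases m1 with
        | zero => cases m2 with
          | zero => rfl
          | succ m2 => simp [qsA_coreF, he]
        | succ m1 => cases m2 with
          | zero => simp [qsA_coreF, he]
          | succ m2 => simp [qsA_coreF, he]
      · obtain ⟨m1, rfl⟩ : ∃ k, m1 = k + 1 := ⟨m1 - 1, by omega⟩
        obtain ⟨m2, rfl⟩ : ∃ k, m2 = k + 1 := ⟨m2 - 1, by omega⟩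
        simp only [qsA_coreF, if_neg he]
        rw [PySem.Int.floordiv_eq_ediv_of_pos (by omega : (0:Int) < 2)]
        have hb1 := qsA_smallerF_base ((s + (e - s) / 2) - s).toNat a s (s + (e - s) / 2)
          (s + (e - s) / 2) (by omega)
        have hb2 := qsA_biggerF_base (e - (s + (e - s) / 2)).toNat
          (qsA_smallerF ((s + (e - s) / 2) - s).toNat a s (s + (e - s) / 2) (s + (e - s) / 2)).1
          (s + (e - s) / 2 + 1)
          (qsA_smallerF ((s + (e - s) / 2) - s).toNat a s (s + (e - s) / 2) (s + (e - s) / 2)).2.2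
          e (by omega) (by omega)
        generalize hg : qsA_biggerF (e - (s + (e - s) / 2)).toNat
          (qsA_smallerF ((s + (e - s) / 2) - s).toNat a s (s + (e - s) / 2) (s + (e - s) / 2)).1
          (s + (e - s) / 2 + 1)
          (qsA_smallerF ((s + (e - s) / 2) - s).toNat a s (s + (e - s) / 2) (s + (e - s) / 2)).2.2
          e = r2 at hb2 ⊢
        obtain ⟨a2, ys2, b2⟩ := r2
        simp only at hb2 ⊢
        have e1 : qsA_coreF m1 a2 s (b2 - 1) = qsA_coreF m2 a2 s (b2 - 1) :=
          ih m1 m2 a2 s (b2 - 1) (by omega) (by omega) (by omega)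
        rw [e1, ih m1 m2 (qsA_coreF m2 a2 s (b2 - 1)).1 (b2 + 1) e (by omega) (by omega) (by omega)]

-- folding A's recursion over a work list: what the stack loop should compute
def qsAfold : List Int → List (Int × Int) → List Int × List (List Int)
  | a, [] => (a, [])
  | a, (s, e) :: rest =>
    ((qsAfold (qsA_coreF (e - s).toNat a s e).1 rest).1,
     (qsA_coreF (e - s).toNat a s e).2 ++ (qsAfold (qsA_coreF (e - s).toNat a s e).1 rest).2)

-- weight of a pending range; the stack's total weight strictly decreases each iteration
def qsB_weight (p : Int × Int) : Nat := 2 ^ (p.2 - p.1 + 1).toNat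

theorem qsB_pow2_split (l r n : Nat) (hl : l + r = n - 1) (h2 : 2 ≤ n) : 2 ^ l + 2 ^ r < 2 ^ n := by
  rcases Nat.eq_zero_or_pos l with h | h
  · subst h
    have : r = n - 1 := by omega
    subst this
    have h3 : 2 ≤ 2 ^ (n - 1) := Nat.one_lt_two_pow_iff.mpr (by omega)
    have h4 : 2 ^ (n - 1) + 2 ^ (n - 1) ≤ 2 ^ n := by
      rw [← Nat.two_mul, ← Nat.pow_succ']
      exact Nat.pow_le_pow_right (by omega) (by omega)
    omega
  · rcases Nat.eq_zero_or_pos r with h' | h'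
    · subst h'
      have : l = n - 1 := by omega
      have h3 : 2 ≤ 2 ^ (n - 1) := Nat.one_lt_two_pow_iff.mpr (by omega)
      have h4 : 2 ^ (n - 1) + 2 ^ (n - 1) ≤ 2 ^ n := by
        rw [← Nat.two_mul, ← Nat.pow_succ']
        exact Nat.pow_le_pow_right (by omega) (by omega)
      subst this; omega
    · have hll : 2 ^ l ≤ 2 ^ (n - 2) := Nat.pow_le_pow_right (by omega) (by omega)
      have hrr : 2 ^ r ≤ 2 ^ (n - 2) := Nat.pow_le_pow_right (by omega) (by omega)
      have h4 : 2 ^ (n - 2) + 2 ^ (n - 2) ≤ 2 ^ (n - 1) := by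
        rw [← Nat.two_mul, ← Nat.pow_succ']
        exact Nat.pow_le_pow_right (by omega) (by omega)
      have h5 : 2 ^ (n - 1) < 2 ^ n := Nat.pow_lt_pow_right (by omega) (by omega)
      omega

-- the stack loop computes the fold of A's recursion over the pending ranges
theorem run_eq : ∀ (n : Nat) (a : List Int) (stack : List (Int × Int)),
    (stack.map qsB_weight).sum ≤ n →
    (∀ p ∈ stack, p.2 - p.1 ≤ 0 ∨ (0 ≤ p.1 ∧ p.2 < (a.length : Int))) →
    qsB_runF n a stack = qsAfold a stack := by
  intro n
  induction n with
  | zero =>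
      intro a stack hw hP
      cases stack with
      | nil => rfl
      | cons p rest =>
          exfalso
          have h1 : 1 ≤ qsB_weight p := Nat.one_le_two_pow
          simp only [List.map_cons, List.sum_cons] at hw
          omega
  | succ n ih =>
      intro a stack hw hP
      cases stack with
      | nil => rfl
      | cons p rest =>
          obtain ⟨s, e⟩ := p
          simp only [List.map_cons, List.sum_cons] at hw
          have hw1 : 1 ≤ qsB_weight (s, e) := Nat.one_le_two_pow
          by_cases htriv : e - s ≤ 0
          · rw [qsB_runF, if_pos htriv, qsAfold, show (e - s).toNat = 0 by omega]
            simp only [qsA_coreF, List.nil_append]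
            exact ih a rest (by omega) (fun q hq => hP q (by simp [hq]))
          · obtain ⟨hs, he⟩ : 0 ≤ s ∧ e < (a.length : Int) := by
              rcases hP (s, e) (by simp) with h | h
              · exact absurd h htriv
              · exact h
            obtain ⟨k, hk⟩ : ∃ k, (e - s).toNat = k + 1 := ⟨(e - s).toNat - 1, by omega⟩
            rw [qsB_runF, if_neg htriv, qsAfold, hk]
            simp only [qsA_coreF, if_neg htriv]
            rw [PySem.Int.floordiv_eq_ediv_of_pos (by omega : (0:Int) < 2)]
            have hmid1 : s ≤ s + (e - s) / 2 := by omega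
            have hmid2 : s + (e - s) / 2 < e := by omega
            obtain ⟨S, hS⟩ : ∃ S : Nat, (S : Int) = s := ⟨s.toNat, Int.toNat_of_nonneg hs⟩
            obtain ⟨M, hM⟩ : ∃ M : Nat, (M : Int) = s + (e - s) / 2 :=
              ⟨(s + (e - s) / 2).toNat, Int.toNat_of_nonneg (by omega)⟩
            obtain ⟨E, hE⟩ : ∃ E : Nat, (E : Int) = e := ⟨e.toNat, Int.toNat_of_nonneg (by omega)⟩
            have hSM : S ≤ M := by omega
            have hME : M < E := by omega
            have hElen : E < a.length := by omega
            have hMlen : M < a.length := by omega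
            have hlenP : (a.take S).length = S := by rw [List.length_take]; omega
            have hlenQ : ((a.drop S).take (M - S)).length = M - S := by
              rw [List.length_take, List.length_drop]; omega
            have hlenR : ((a.drop (M + 1)).take (E - M)).length = E - M := by
              rw [List.length_take, List.length_drop]; omega
            -- decompose a around the segment
            have hdec : a = a.take S ++ ((a.drop S).take (M - S) ++ ([a[M]] ++ ((a.drop (M + 1)).take (E - M) ++ a.drop (E + 1)))) := by
              have t1 : a.take M = a.take S ++ (a.drop S).take (M - S) := by
                rw [show M = S + (M - S) by omega, List.take_add, Nat.add_sub_cancel_left]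
              have t2 : a.drop M = a[M] :: ((a.drop (M + 1)).take (E - M) ++ a.drop (E + 1)) := by
                rw [List.drop_eq_getElem_cons hMlen]
                congr 1
                conv_lhs => rw [← List.take_append_drop (E - M) (a.drop (M + 1))]
                rw [List.drop_drop, show M + 1 + (E - M) = E + 1 by omega]
              calc a = a.take M ++ a.drop M := (List.take_append_drop M a).symm
                _ = _ := by rw [t1, t2]; simp
            -- the slices in B
            have hsl1 : PySem.List.slice a none (some s) = a.take S := by
              rw [← hS, PySem.List.slice_to_natCast]
            have hsl2 : PySem.List.slice a (some s) (some (s + (e - s) / 2)) = (a.drop S).take (M - S) := by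
              rw [← hM, ← hS, PySem.List.slice_natCast]
            have hsl3 : PySem.List.slice a (some (s + (e - s) / 2 + 1)) (some (e + 1)) = (a.drop (M + 1)).take (E - M) := by
              rw [show s + (e - s) / 2 + 1 = ((M + 1 : Nat) : Int) by rw [← hM]; push_cast; ring,
                show e + 1 = ((E + 1 : Nat) : Int) by push_cast; omega,
                PySem.List.slice_natCast, show E + 1 - (M + 1) = E - M by omega]
            have hsl4 : PySem.List.slice a (some (e + 1)) none = a.drop (E + 1) := by
              rw [show e + 1 = ((E + 1 : Nat) : Int) by push_cast; omega,
                PySem.List.slice_from_natCast]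
            have hgv : PySem.List.pyGetD a (s + (e - s) / 2) 0 = a[M] := by
              rw [← hM, PySem.List.pyGetD_natCast, List.getD_eq_getElem _ _ hMlen]
            rw [hsl1, hsl2, hsl3, hsl4, hgv]
            -- phase 1
            have e1 := phase1_eq (a.take S) ((a.drop (M + 1)).take (E - M)) (a.drop (E + 1)) a[M]
              ((a.drop S).take (M - S)) (s + (e - s) / 2 - s).toNat [] [] s (s + (e - s) / 2) (s + (e - s) / 2)
              (by rw [hlenQ]; omega)
              (by rw [hlenP]; simp; omega)
              (by rw [hlenQ]; omega)
              (by simp)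
            simp only [List.append_nil, List.append_assoc] at e1
            rw [← hdec] at e1
            have hl1 := qsB_phase1_len (a.take S) a[M] ((a.drop (M + 1)).take (E - M)) (a.drop (E + 1))
              ((a.drop S).take (M - S)) [] []
            rw [e1]
            generalize hg1 : qsB_phase1 (a.take S) a[M] ((a.drop (M + 1)).take (E - M)) (a.drop (E + 1))
              ((a.drop S).take (M - S)) [] [] = P1 at *
            obtain ⟨k1, m1, ys1⟩ := P1
            simp only [List.length_nil, hlenQ] at hl1
            simp only
            have e2 := phase2_eq (a.take S ++ k1) (a.drop (E + 1)) a[M]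
              ((a.drop (M + 1)).take (E - M)) (e - (s + (e - s) / 2)).toNat [] m1
              (s + (e - s) / 2 + 1) ((a.take S).length + (k1.length : Int)) e
              (by rw [hlenR]; omega)
              (by simp)
              (by rw [hlenP]; omega)
              (by rw [hlenP, hlenR]; omega)
            simp only [List.append_nil, List.append_assoc] at e2
            have hl2 := qsB_phase2_len (a.take S ++ k1) a[M] (a.drop (E + 1))
              ((a.drop (M + 1)).take (E - M)) [] m1
            rw [e2]
            generalize hg2 : qsB_phase2 (a.take S ++ k1) a[M] (a.drop (E + 1))
              ((a.drop (M + 1)).take (E - M)) [] m1 = P2 at *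
            obtain ⟨s2, b2, ys2⟩ := P2
            simp only [List.length_nil, hlenR] at hl2
            simp only
            have hlen12 : (a.take S ++ k1).length = S + k1.length := by simp [hlenP]
            have hbb : s + (k1.length : Int) + (s2.length : Int)
                = ((a.take S ++ k1).length : Int) + (s2.length : Int) := by
              rw [hlen12]; push_cast; omega
            rw [hbb]
            have ha2 : a.take S ++ k1 ++ s2 ++ [a[M]] ++ b2 ++ a.drop (E + 1)
                = a.take S ++ (k1 ++ (s2 ++ ([a[M]] ++ (b2 ++ a.drop (E + 1))))) := by simp
            rw [ha2]
            have hlenA2 : (List.take S a ++ (k1 ++ (s2 ++ ([a[M]] ++ (b2 ++ List.drop (E + 1) a))))).length = a.length := by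
              simp [hlenP, List.length_drop]; omega
            rw [hlen12]
            rw [ih (List.take S a ++ (k1 ++ (s2 ++ ([a[M]] ++ (b2 ++ List.drop (E + 1) a)))))
              ((s, ((S + k1.length : Nat) : Int) + (s2.length : Int) - 1)
                :: (((S + k1.length : Nat) : Int) + (s2.length : Int) + 1, e) :: rest)
              (by
                simp only [List.map_cons, List.sum_cons, qsB_weight]
                have hsplit := qsB_pow2_split
                  ((((S + k1.length : Nat) : Int) + (s2.length : Int) - 1 - s + 1)).toNat
                  ((e - (((S + k1.length : Nat) : Int) + (s2.length : Int) + 1) + 1)).toNat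
                  (e - s + 1).toNat (by omega) (by omega)
                have hwq : qsB_weight (s, e) = 2 ^ (e - s + 1).toNat := rfl
                rw [hwq] at hw
                omega)
              (by
                intro p hp
                simp only [List.mem_cons] at hp
                rcases hp with rfl | rfl | hp
                · exact Or.inr ⟨hs, by rw [hlenA2]; omega⟩
                · exact Or.inr ⟨by omega, by rw [hlenA2]; omega⟩
                · rcases hP p (by simp [hp]) with h | h
                  · exact Or.inl h
                  · exact Or.inr ⟨h.1, by rw [hlenA2]; omega⟩)]
            rw [qsAfold, qsAfold]
            rw [coreF_fuel k k ((((S + k1.length : Nat) : Int) + (s2.length : Int) - 1) - s).toNat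
              (List.take S a ++ (k1 ++ (s2 ++ ([a[M]] ++ (b2 ++ List.drop (E + 1) a))))) s
              (((S + k1.length : Nat) : Int) + (s2.length : Int) - 1) (by omega) (by omega) (by omega)]
            rw [coreF_fuel k k (e - (((S + k1.length : Nat) : Int) + (s2.length : Int) + 1)).toNat
              (qsA_coreF ((((S + k1.length : Nat) : Int) + (s2.length : Int) - 1) - s).toNat
                (List.take S a ++ (k1 ++ (s2 ++ ([a[M]] ++ (b2 ++ List.drop (E + 1) a))))) s
                (((S + k1.length : Nat) : Int) + (s2.length : Int) - 1)).1
              (((S + k1.length : Nat) : Int) + (s2.length : Int) + 1) e (by omega) (by omega) (by omega)]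
            simp [List.append_assoc]

-- ===== VERDICT (by name: the statement is the Claim_ definition above) =====
theorem quick_sort_alg_gen_spec : Claim_equal_quick_sort_alg_gen := by
  unfold Claim_equal_quick_sort_alg_gen
  intro a s e _ hpre
  unfold Spec_quick_sort_alg_gen quick_sort_alg_gen quick_sort_alg_gen_alt Pre_quick_sort_alg_gen at *
  rw [run_eq (2 ^ (e - s + 1).toNat) a [(s, e)]
    (by simp only [List.map_cons, List.map_nil, List.sum_cons, List.sum_nil, qsB_weight]; omega)
    (by intro p hp; simp at hp; subst hp; exact hpre)]
  rw [qsAfold, qsAfold]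
  simp
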